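-- pv_equiv track=rewrite | github.com/manohar6839/Cortex | backend/services/lint_engine.py | _is_covered_by_existing_article
-- ===== SOURCE A (Python) =====
-- def _is_covered_by_existing_article(concept: str, existing_articles: dict) -> bool:
--     """Check if a concept might be covered by an existing article with a related slug."""
--     concept_words = set(concept.lower().replace("-", " ").split())
--
--     for slug in existing_articles:
--         slug_words = set(slug.replace("-", " ").split())
--         # If they share significant words, consider it covered
--         common = concept_words & slug_words
--         # Require at least one meaningful common word (4+ chars)
--         if any(len(w) >= 4 for w in common):
--             return True
--     return False
-- ===== SOURCE B (Python) =====
-- def _is_covered_by_existing_article(concept: str, existing_articles: dict) -> bool: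
--     """Check if a concept might be covered by an existing article with a related slug."""
--     meaningful = {w for w in concept.lower().replace("-", " ").split() if len(w) >= 4}
--     pool = set()
--     for slug in existing_articles:
--         pool.update(slug.replace("-", " ").split())
--     return bool(meaningful & pool)
-- ===== Notes on version B (the rewrite author's own statement) =====
-- stated objective: alternative
-- what changed: Instead of intersecting the concept's word set with each slug's word set and early-exiting, B pre-filters the concept words to the meaningful (4+ char) ones once, builds one combined pool of all slug words in a single pass, and returns whether the two sets intersect.
import Mathlib
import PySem

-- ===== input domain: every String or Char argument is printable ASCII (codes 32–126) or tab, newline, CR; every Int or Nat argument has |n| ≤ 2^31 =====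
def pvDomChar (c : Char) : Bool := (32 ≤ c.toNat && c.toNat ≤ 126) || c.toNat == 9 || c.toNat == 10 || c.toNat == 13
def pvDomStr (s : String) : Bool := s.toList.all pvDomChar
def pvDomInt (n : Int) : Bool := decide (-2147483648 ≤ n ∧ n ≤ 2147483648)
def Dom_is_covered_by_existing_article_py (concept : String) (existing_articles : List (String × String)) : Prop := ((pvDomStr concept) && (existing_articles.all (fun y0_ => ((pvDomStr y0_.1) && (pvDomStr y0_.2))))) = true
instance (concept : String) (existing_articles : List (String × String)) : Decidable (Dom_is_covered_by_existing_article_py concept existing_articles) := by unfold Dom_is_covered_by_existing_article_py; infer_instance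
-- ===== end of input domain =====

-- ===== PORT A =====
-- B builds one pooled slug-word set plus a pre-filtered meaningful concept-word set instead of a per-slug intersection loop (alternative decomposition).

-- shared helper: words of s after replacing "-" with " " and splitting on whitespace
def pvWords (s : String) : List String :=
  PySem.Str.split₀ (PySem.Str.replace s "-" " ")

-- port of A: for each slug (dict key), intersect word sets and test for a 4+ char common word
def is_covered_by_existing_article_py (concept : String) (existing_articles : List (String × String)) : Bool :=
  let concept_words : PySem.Set String := PySem.Set.ofList (pvWords (PySem.Str.lower concept))
  existing_articles.any (fun p =>
    let slug_words : PySem.Set String := PySem.Set.ofList (pvWords p.1)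
    let common := PySem.Set.inter concept_words slug_words
    common.any (fun w => decide (4 ≤ PySem.Str.len w)))

-- ===== PORT B =====
-- port of B: meaningful concept words once, one pooled set of all slug words, single intersection test
def is_covered_by_existing_article_py_alt (concept : String) (existing_articles : List (String × String)) : Bool :=
  let meaningful : PySem.Set String :=
    PySem.Set.ofList ((pvWords (PySem.Str.lower concept)).filter (fun w => decide (4 ≤ PySem.Str.len w)))
  let pool : PySem.Set String :=
    existing_articles.foldl (fun acc p => PySem.Set.update acc (pvWords p.1)) PySem.Set.empty
  !(PySem.Set.inter meaningful pool).isEmpty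

-- ===== PRECONDITION & SPEC =====
def Spec_is_covered_by_existing_article_py (concept : String) (existing_articles : List (String × String)) (out : Bool) : Prop := out = is_covered_by_existing_article_py_alt concept existing_articles
instance (concept : String) (existing_articles : List (String × String)) (out : Bool) : Decidable (Spec_is_covered_by_existing_article_py concept existing_articles out) := by unfold Spec_is_covered_by_existing_article_py; infer_instance

-- ===== CLAIM (what is proved, stated in full; the proofs are below) =====
def Claim_equal_is_covered_by_existing_article_py : Prop := ∀ (concept : String) (existing_articles : List (String × String)), Dom_is_covered_by_existing_article_py concept existing_articles → Spec_is_covered_by_existing_article_py concept existing_articles (is_covered_by_existing_article_py concept existing_articles)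

-- ===== LEMMAS AND PROOFS =====

theorem pv_mem_inter {s t : PySem.Set String} {x : String} :
    x ∈ PySem.Set.inter s t ↔ x ∈ s ∧ x ∈ t := by
  simp [PySem.Set.inter, PySem.Set.contains]

theorem pv_mem_update (xs : List String) (s : PySem.Set String) (x : String) :
    x ∈ PySem.Set.update s xs ↔ x ∈ s ∨ x ∈ xs := by
  induction xs generalizing s with
  | nil => simp [PySem.Set.update]
  | cons y ys ih =>
    simp only [PySem.Set.update, List.foldl_cons] at *
    rw [ih, PySem.Set.mem_add]
    simp only [List.mem_cons]
    tauto

theorem pv_mem_pool (arts : List (String × String)) (x : String) :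
    x ∈ arts.foldl (fun acc p => PySem.Set.update acc (pvWords p.1)) PySem.Set.empty ↔
      ∃ p ∈ arts, x ∈ pvWords p.1 := by
  have key : ∀ (l : List (String × String)) (init : PySem.Set String),
      x ∈ l.foldl (fun acc p => PySem.Set.update acc (pvWords p.1)) init ↔
        x ∈ init ∨ ∃ p ∈ l, x ∈ pvWords p.1 := by
    intro l
    induction l with
    | nil => simp
    | cons q qs ih =>
      intro init
      simp only [List.foldl_cons, ih, pv_mem_update, List.mem_cons]
      constructor
      · rintro ((h | h) | ⟨p, hp, hw⟩)
        · exact Or.inl h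
        · exact Or.inr ⟨q, Or.inl rfl, h⟩
        · exact Or.inr ⟨p, Or.inr hp, hw⟩
      · rintro (h | ⟨p, (rfl | hp), hw⟩)
        · exact Or.inl (Or.inl h)
        · exact Or.inl (Or.inr hw)
        · exact Or.inr ⟨p, hp, hw⟩
  simpa [PySem.Set.empty] using key arts PySem.Set.empty

-- ===== VERDICT (by name: the statement is the Claim_ definition above) =====
theorem is_covered_by_existing_article_py_spec : Claim_equal_is_covered_by_existing_article_py := by
  intro concept arts _
  unfold Spec_is_covered_by_existing_article_py
  unfold is_covered_by_existing_article_py is_covered_by_existing_article_py_alt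
  rw [Bool.eq_iff_iff]
  simp only [List.any_eq_true, Bool.not_eq_true', List.isEmpty_eq_false_iff_exists_mem,
    decide_eq_true_eq]
  constructor
  · rintro ⟨p, hp, w, hw, hlen⟩
    rw [pv_mem_inter] at hw
    refine ⟨w, ?_⟩
    rw [pv_mem_inter, PySem.Set.mem_ofList, List.mem_filter, pv_mem_pool]
    exact ⟨⟨(PySem.Set.mem_ofList ..).1 hw.1, by simpa using hlen⟩, p, hp, (PySem.Set.mem_ofList ..).1 hw.2⟩
  · rintro ⟨w, hw⟩
    rw [pv_mem_inter, PySem.Set.mem_ofList, List.mem_filter, pv_mem_pool] at hw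
    obtain ⟨⟨hc, hlen⟩, p, hp, hs⟩ := hw
    refine ⟨p, hp, w, ?_, by simpa using hlen⟩
    rw [pv_mem_inter]
    exact ⟨(PySem.Set.mem_ofList ..).2 hc, (PySem.Set.mem_ofList ..).2 hs⟩
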